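-- pv_equiv track=rewrite | github.com/Kingslayer9988/bgo_holding | read_chinese.py | calculate_values
-- ===== SOURCE A (Python) =====
-- def calculate_values(items):
--     results = {}
--     total_time = 0
--     for item, data in items.items():
--         total_item_time = data['quantity'] * data['build_time']
--         results[item] = total_item_time
--         total_time += total_item_time
--     return results, total_time
-- ===== SOURCE B (Python) =====
-- def calculate_values(items):
--     def go(pairs):
--         if not pairs:
--             return [], 0
--         (item, data), rest = pairs[0], pairs[1:]
--         t = data['quantity'] * data['build_time']
--         sub, subtotal = go(rest)
--         return [(item, t)] + sub, t + subtotal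
--     lst, total = go(list(items.items()))
--     return dict(lst), total
-- ===== Notes on version B (the rewrite author's own statement) =====
-- stated objective: alternative
-- what changed: B replaces A's single forward loop with a running accumulator by structural recursion on the item list: the tail's result list and subtotal are computed first, each step prepends its pair and adds its time (total summed right-to-left), and the dict is built once at the end from the pair list.
import Mathlib
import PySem

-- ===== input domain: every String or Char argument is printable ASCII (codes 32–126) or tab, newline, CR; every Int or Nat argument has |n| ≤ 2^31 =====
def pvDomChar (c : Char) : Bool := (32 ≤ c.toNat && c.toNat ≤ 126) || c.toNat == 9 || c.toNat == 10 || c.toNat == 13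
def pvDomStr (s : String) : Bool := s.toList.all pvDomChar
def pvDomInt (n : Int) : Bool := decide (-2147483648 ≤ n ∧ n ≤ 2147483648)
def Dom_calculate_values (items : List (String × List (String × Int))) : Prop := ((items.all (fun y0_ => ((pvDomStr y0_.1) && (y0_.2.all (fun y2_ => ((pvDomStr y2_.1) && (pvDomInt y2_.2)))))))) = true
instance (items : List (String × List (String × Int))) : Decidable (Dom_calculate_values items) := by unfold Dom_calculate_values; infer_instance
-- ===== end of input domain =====

-- B recomputes the same table and total by structural recursion (tail first, prepend, sum right-to-left, dict built last) instead of A's forward accumulator loop.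


-- shared helper: data['quantity'] * data['build_time'] (both Pythons compute this same expression)
def pvItemTime (data : List (String × Int)) : Int :=
  ((PySem.Dict.mk data).get? "quantity").getD 0 * ((PySem.Dict.mk data).get? "build_time").getD 0

-- ===== PORT A =====
-- A's single loop: build the results dict and accumulate total_time in one pass.
def calculate_values (items : List (String × List (String × Int))) : (List (String × Int)) × Int :=
  let st := items.foldl
    (fun (st : PySem.Dict String Int × Int) p =>
      let t := pvItemTime p.2
      (st.1.insert p.1 t, st.2 + t))
    (PySem.Dict.empty, 0)
  (st.1.items, st.2)

-- ===== PORT B =====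
-- B's recursive helper go: tail's pair list and subtotal first, then prepend and add.
def pvGo : List (String × List (String × Int)) → (List (String × Int)) × Int
  | [] => ([], 0)
  | p :: rest =>
    let t := pvItemTime p.2
    let s := pvGo rest
    ((p.1, t) :: s.1, t + s.2)

-- B: recurse, then dict(lst) = fold the pair list into a fresh dict.
def calculate_values_alt (items : List (String × List (String × Int))) : (List (String × Int)) × Int :=
  let r := pvGo items
  ((r.1.foldl (fun (d : PySem.Dict String Int) p => d.insert p.1 p.2) PySem.Dict.empty).items, r.2)

-- ===== PRECONDITION & SPEC =====
-- Pre_ excludes (a) inner dicts missing 'quantity' or 'build_time', where Python A raises KeyError,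
-- and (b) duplicate outer keys, which a Python dict (A's argument) cannot represent at all.
def Pre_calculate_values (items : List (String × List (String × Int))) : Prop :=
  (items.map Prod.fst).Nodup ∧
  (items.all (fun p => (PySem.Dict.mk p.2).contains "quantity" && (PySem.Dict.mk p.2).contains "build_time")) = true
instance (items : List (String × List (String × Int))) : Decidable (Pre_calculate_values items) := by unfold Pre_calculate_values; infer_instance
def pvWitness_calculate_values : (List (String × List (String × Int))) :=
  [("a", [("quantity", 2), ("build_time", 3)]), ("b", [("quantity", 0), ("build_time", 5)])]
def Spec_calculate_values (items : List (String × List (String × Int))) (out : (List (String × Int)) × Int) : Prop := out = calculate_values_alt items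
instance (items : List (String × List (String × Int))) (out : (List (String × Int)) × Int) : Decidable (Spec_calculate_values items out) := by unfold Spec_calculate_values; infer_instance

-- ===== CLAIM =====
def Claim_equal_calculate_values : Prop := ∀ (items : List (String × List (String × Int))), Dom_calculate_values items → Pre_calculate_values items → Spec_calculate_values items (calculate_values items)

-- ===== LEMMAS AND PROOFS =====
-- B's recursion produces the mapped pair list and its right-to-left sum.
theorem pvGo_eq (l : List (String × List (String × Int))) :
    pvGo l = (l.map (fun p => (p.1, pvItemTime p.2)),
              ((l.map (fun p => (p.1, pvItemTime p.2))).map Prod.snd).sum) := by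
  induction l with
  | nil => simp [pvGo]
  | cons p rest ih => simp [pvGo, ih]

-- A's loop, with a general accumulator, produces the same map and sum.
theorem pv_loop (l : List (String × List (String × Int))) :
    ∀ (d : PySem.Dict String Int) (t : Int),
    (∀ p ∈ l, d.contains p.1 = false) → (l.map Prod.fst).Nodup →
    (l.foldl (fun (st : PySem.Dict String Int × Int) p =>
        (st.1.insert p.1 (pvItemTime p.2), st.2 + pvItemTime p.2)) (d, t)).1.items
      = d.items ++ l.map (fun p => (p.1, pvItemTime p.2))
    ∧ (l.foldl (fun (st : PySem.Dict String Int × Int) p =>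
        (st.1.insert p.1 (pvItemTime p.2), st.2 + pvItemTime p.2)) (d, t)).2
      = t + ((l.map (fun p => (p.1, pvItemTime p.2))).map Prod.snd).sum := by
  induction l with
  | nil => intro d t _ _; simp
  | cons p rest ih =>
    intro d t hfresh hnd
    simp only [List.map_cons, List.nodup_cons] at hnd
    have hfp : d.contains p.1 = false := hfresh p (List.mem_cons_self)
    have hrest : ∀ q ∈ rest, (d.insert p.1 (pvItemTime p.2)).contains q.1 = false := by
      intro q hq
      rw [PySem.Dict.contains_insert]
      have hq1 : q.1 ≠ p.1 := by
        intro h; exact hnd.1 (h ▸ List.mem_map_of_mem hq)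
      simp [hq1, hfresh q (List.mem_cons_of_mem _ hq)]
    obtain ⟨h1, h2⟩ := ih (d.insert p.1 (pvItemTime p.2)) (t + pvItemTime p.2) hrest hnd.2
    constructor
    · simp only [List.foldl_cons, h1, PySem.Dict.items_insert, hfp]
      simp
    · simp only [List.foldl_cons, h2, List.map_cons, List.map_map, List.sum_cons]
      ring

-- ===== VERDICT =====
theorem calculate_values_spec : Claim_equal_calculate_values := by
  intro items _ hpre
  obtain ⟨hnd, _⟩ := hpre
  obtain ⟨h1, h2⟩ := pv_loop items PySem.Dict.empty 0
    (by intro p _; exact PySem.Dict.contains_empty _) hnd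
  unfold Spec_calculate_values calculate_values calculate_values_alt
  rw [pvGo_eq]
  have hfold := PySem.Dict.items_foldl_insert_fresh
    (l := items.map (fun p => (p.1, pvItemTime p.2)))
    (k := Prod.fst) (v := Prod.snd) (d := PySem.Dict.empty)
    (by intro a _; exact PySem.Dict.contains_empty _)
    (by simpa [List.map_map, Function.comp] using hnd)
  rw [Prod.ext_iff]
  constructor
  · simpa [hfold] using h1
  · simpa using h2
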